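-- pv_equiv track=rewrite | github.com/Saroj-Shandiliya/encryptNdecrypt | END/views.py | cutter
-- ===== SOURCE A (Python) =====
-- def cutter(pw):                         #cuts messages recieved via SQL
--     pw=str(pw)
--     j=len(pw)-4
--     k=''
--     h=0
--     for h in range(j):
--         if h>2:
--             k=k+pw[h]
--     return k
-- ===== SOURCE B (Python) =====
-- def cutter(pw):
--     pw = str(pw)
--     return pw[3:len(pw)-4]
-- ===== Notes on version B (the rewrite author's own statement) =====
-- stated objective: idiomatic
-- what changed: Replaces the per-character loop with index guard and running string concatenation by a single closed-form slice pw[3:len(pw)-4].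
import Mathlib
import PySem

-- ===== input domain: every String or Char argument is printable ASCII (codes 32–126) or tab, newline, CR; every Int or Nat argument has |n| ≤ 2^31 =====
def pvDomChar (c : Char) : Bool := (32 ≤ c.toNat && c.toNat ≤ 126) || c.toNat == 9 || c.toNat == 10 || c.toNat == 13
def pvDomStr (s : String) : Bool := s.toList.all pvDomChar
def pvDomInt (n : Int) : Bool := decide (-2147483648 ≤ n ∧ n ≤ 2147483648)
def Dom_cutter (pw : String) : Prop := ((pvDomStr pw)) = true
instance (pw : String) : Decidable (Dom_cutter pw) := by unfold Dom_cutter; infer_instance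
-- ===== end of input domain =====

-- B replaces A's per-character loop and concatenation by the closed-form slice pw[3:len(pw)-4] (idiomatic).

-- ===== PORT A =====
-- loop: for h in range(j): if h>2: k = k + pw[h]   (pw[h] is always in range, so pyGetD is exact here)
def cutter (pw : String) : String :=
  String.ofList ((PySem.List.pyRange 0 ((pw.toList.length : Int) - 4) 1).foldl
    (fun k h => if h > 2 then k ++ [PySem.List.pyGetD pw.toList h ' '] else k) ([] : List Char))

-- ===== PORT B =====
def cutter_alt (pw : String) : String :=
  String.ofList (PySem.List.slice pw.toList (some 3) (some ((pw.toList.length : Int) - 4)))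

-- ===== PRECONDITION & SPEC =====
def Spec_cutter (pw : String) (out : String) : Prop := out = cutter_alt pw
instance (pw : String) (out : String) : Decidable (Spec_cutter pw out) := by unfold Spec_cutter; infer_instance

-- ===== CLAIM (what is proved, stated in full; the proofs are below) =====
def Claim_equal_cutter : Prop := ∀ (pw : String), Dom_cutter pw → Spec_cutter pw (cutter pw)

-- ===== LEMMAS AND PROOFS =====

-- loop invariant: the fold over range(n) collects exactly the characters at indices 3..n-1
lemma cutter_loop_eq (l : List Char) (n : Nat) (hn : n ≤ l.length) (acc : List Char) :
    (PySem.List.pyRange 0 (n : Int) 1).foldl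
      (fun k h => if h > 2 then k ++ [PySem.List.pyGetD l h ' '] else k) acc
    = acc ++ (l.take n).drop 3 := by
  induction n generalizing acc with
  | zero => simp [PySem.List.pyRange_one_eq_nil]
  | succ m ih =>
    have h1 : ((m : Int) + 1) = ((m + 1 : Nat) : Int) := by push_cast; ring
    rw [← h1, PySem.List.pyRange_one_succ_right (by positivity), List.foldl_append,
      ih (by omega)]
    have hm : m < l.length := by omega
    have hget : PySem.List.pyGetD l (m : Int) ' ' = l[m] := by
      simp [PySem.List.pyGetD, PySem.List.pyGet?, PySem.List.pyIdx?, hm]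
    have htake : l.take (m + 1) = l.take m ++ [l[m]] := by
      rw [List.take_add_one]; simp [List.getElem?_eq_getElem hm]
    by_cases h3 : 3 ≤ m
    · have : ((m : Int) > 2) := by exact_mod_cast (by omega : (2:Int) < m)
      simp only [List.foldl_cons, List.foldl_nil, if_pos this, hget, htake]
      rw [List.drop_append_of_le_length (by simp; omega), List.append_assoc]
    · have hni : ¬ ((m : Int) > 2) := by push_cast; omega
      simp only [List.foldl_cons, List.foldl_nil, if_neg hni, htake]
      rw [List.drop_eq_nil_of_le (by simp; omega), List.drop_eq_nil_of_le (by simp; omega)]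

lemma take_drop_comm (l : List Char) (n : Nat) :
    (l.take n).drop 3 = (l.drop 3).take (n - 3) := by
  rw [List.drop_take]

-- ===== VERDICT (by name: the statement is the Claim_ definition above) =====
theorem cutter_spec : Claim_equal_cutter := by
  intro pw _
  unfold Spec_cutter cutter cutter_alt
  set l := pw.toList with hl
  by_cases h : 4 ≤ l.length
  · have hj : ((l.length : Int) - 4) = ((l.length - 4 : Nat) : Int) := by push_cast [h]; ring
    rw [hj, cutter_loop_eq l (l.length - 4) (by omega) [],
      PySem.List.slice_toNat _ (by norm_num) (by positivity)]
    simp [take_drop_comm]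
  · -- len < 4: the loop runs zero times and the slice is empty
    have hj : ((l.length : Int) - 4) ≤ 0 := by omega
    rw [PySem.List.pyRange_one_eq_nil (by omega)]
    match l, (by omega : l.length < 4) with
    | [], _ => simp [PySem.List.slice]
    | [a], _ => simp [PySem.List.slice, PySem.List.clampIdx]
    | [a,b], _ => simp [PySem.List.slice, PySem.List.clampIdx]
    | [a,b,c], _ => simp [PySem.List.slice, PySem.List.clampIdx]
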